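-- pv_equiv track=rewrite | github.com/Mando-369/multi-model-AI-development-assistant | src/core/project_meta_manager.py | truncate_for_context
-- ===== SOURCE A (Python) =====
-- def truncate_for_context(content: str, max_chars: int = 2000) -> str:
--     """Truncate PROJECT_META.md for injection into agent context.
--
--     Prioritizes: Vision & Goals, Current Roadmap, Export Queue
--
--     Args:
--         content: Full PROJECT_META.md content
--         max_chars: Maximum characters to include
--
--     Returns:
--         Truncated content with priority sections
--     """
--     if len(content) <= max_chars:
--         return content
--
--     # Priority sections to keep
--     priority_sections = [
--         "## Vision & Goals",
--         "## Current Roadmap",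
--         "## Export Queue"
--     ]
--
--     lines = content.split('\n')
--     result_lines = []
--     current_chars = 0
--     in_priority_section = False
--     current_section = ""
--
--     for line in lines:
--         # Check if entering a section
--         if line.startswith('## '):
--             current_section = line
--             in_priority_section = any(ps in line for ps in priority_sections)
--
--         # Always include header lines
--         if line.startswith('# Project:') or line.startswith('Last Updated:') or line.startswith('Updated By:'):
--             result_lines.append(line)
--             current_chars += len(line) + 1
--             continue
--
--         # Include priority section content
--         if in_priority_section:
--             if current_chars + len(line) + 1 > max_chars:
--                 result_lines.append("... (truncated)")
--                 break
--             result_lines.append(line)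
--             current_chars += len(line) + 1
--
--     return '\n'.join(result_lines)
-- ===== SOURCE B (Python) =====
-- def truncate_for_context(content: str, max_chars: int = 2000) -> str:
--     """Two-pass rewrite: label the kept lines first, then spend the char budget."""
--     if len(content) <= max_chars:
--         return content
--     priority_sections = [
--         "## Vision & Goals",
--         "## Current Roadmap",
--         "## Export Queue"
--     ]
--     # Pass 1: walk the lines once, keeping only forced header lines (True)
--     # and lines inside a priority '## ' section (False).
--     labelled = []
--     in_priority = False
--     for line in content.split('\n'):
--         if line.startswith('## '):
--             in_priority = any(ps in line for ps in priority_sections)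
--         if line.startswith('# Project:') or line.startswith('Last Updated:') or line.startswith('Updated By:'):
--             labelled.append((line, True))
--         elif in_priority:
--             labelled.append((line, False))
--     # Pass 2: spend the budget; forced lines count toward it but never trigger the cut.
--     out = []
--     budget = 0
--     for line, forced in labelled:
--         if not forced and budget + len(line) + 1 > max_chars:
--             out.append("... (truncated)")
--             break
--         out.append(line)
--         budget += len(line) + 1
--     return '\n'.join(out)
-- ===== Notes on version B (the rewrite author's own statement) =====
-- stated objective: alternative
-- what changed: Replaced A's single loop with interleaved budget/section state by a two-pass pipeline: pass 1 labels kept lines (forced header vs priority-section), pass 2 spends the char budget over the labelled list.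
import Mathlib
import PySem

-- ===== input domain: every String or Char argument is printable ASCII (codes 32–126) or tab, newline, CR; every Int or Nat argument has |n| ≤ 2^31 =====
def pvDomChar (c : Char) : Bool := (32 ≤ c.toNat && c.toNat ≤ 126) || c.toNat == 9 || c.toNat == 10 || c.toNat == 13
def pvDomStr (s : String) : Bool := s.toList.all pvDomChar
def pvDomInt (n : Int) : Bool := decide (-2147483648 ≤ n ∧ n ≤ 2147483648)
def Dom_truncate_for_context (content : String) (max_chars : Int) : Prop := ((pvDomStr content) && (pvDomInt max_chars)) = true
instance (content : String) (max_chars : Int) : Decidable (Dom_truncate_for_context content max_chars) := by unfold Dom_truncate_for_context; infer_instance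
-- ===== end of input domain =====

-- B replaces A's single stateful loop by a label pass followed by a budget pass (alternative decomposition, same cost).

-- ===== PORT A =====
-- shared literal predicates of both Pythons: the forced-header test and the priority-section test
def pvForced (line : String) : Bool :=
  PySem.Str.startswith line "# Project:" || PySem.Str.startswith line "Last Updated:" || PySem.Str.startswith line "Updated By:"

def pvAnyPriority (line : String) : Bool :=
  ["## Vision & Goals", "## Current Roadmap", "## Export Queue"].any (fun ps => PySem.Str.isIn ps line)

-- the section-state update both loops perform on each line ('if line.startswith("## "): in_priority = any(...)')
def pvNextPrio (line : String) (inprio : Bool) : Bool :=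
  if PySem.Str.startswith line "## " then pvAnyPriority line else inprio

-- content.split('\n'): Str.split? is `some` for the nonempty separator "\n", so .getD [] is exact
-- A's for-loop: state = (in_priority_section, current_chars); break returns the sentinel line and stops
def pvALoop (max_chars : Int) (lines : List String) (inprio : Bool) (chars : Int) : List String :=
  match lines with
  | [] => []
  | line :: rest =>
    let inprio' := pvNextPrio line inprio
    if pvForced line then
      line :: pvALoop max_chars rest inprio' (chars + PySem.Str.len line + 1)
    else if inprio' then
      if chars + PySem.Str.len line + 1 > max_chars then ["... (truncated)"]
      else line :: pvALoop max_chars rest inprio' (chars + PySem.Str.len line + 1)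
    else pvALoop max_chars rest inprio' chars

def truncate_for_context (content : String) (max_chars : Int) : String :=
  if PySem.Str.len content ≤ max_chars then content
  else PySem.Str.join "\n" (pvALoop max_chars ((PySem.Str.split? content "\n").getD []) false 0)

-- ===== PORT B =====
-- pass 1: label the kept lines (true = forced header, false = priority-section line)
def pvLabel (lines : List String) (inprio : Bool) : List (String × Bool) :=
  match lines with
  | [] => []
  | line :: rest =>
    let inprio' := pvNextPrio line inprio
    if pvForced line then (line, true) :: pvLabel rest inprio'
    else if inprio' then (line, false) :: pvLabel rest inprio'
    else pvLabel rest inprio'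

-- pass 2: spend the char budget over the labelled list
def pvEmit (max_chars : Int) (labelled : List (String × Bool)) (budget : Int) : List String :=
  match labelled with
  | [] => []
  | (line, forced) :: rest =>
    if !forced && budget + PySem.Str.len line + 1 > max_chars then ["... (truncated)"]
    else line :: pvEmit max_chars rest (budget + PySem.Str.len line + 1)

def truncate_for_context_alt (content : String) (max_chars : Int) : String :=
  if PySem.Str.len content ≤ max_chars then content
  else PySem.Str.join "\n" (pvEmit max_chars (pvLabel ((PySem.Str.split? content "\n").getD []) false) 0)

-- ===== PRECONDITION & SPEC =====
def Spec_truncate_for_context (content : String) (max_chars : Int) (out : String) : Prop := out = truncate_for_context_alt content max_chars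
instance (content : String) (max_chars : Int) (out : String) : Decidable (Spec_truncate_for_context content max_chars out) := by unfold Spec_truncate_for_context; infer_instance

-- ===== CLAIM (what is proved, stated in full; the proofs are below) =====
def Claim_equal_truncate_for_context : Prop := ∀ (content : String) (max_chars : Int), Dom_truncate_for_context content max_chars → Spec_truncate_for_context content max_chars (truncate_for_context content max_chars)

-- ===== LEMMAS AND PROOFS =====
-- fusion: A's one-pass loop equals B's label pass followed by the budget pass, for every loop state
theorem pvALoop_eq_emit_label (max_chars : Int) (lines : List String) (inprio : Bool) (chars : Int) :
    pvALoop max_chars lines inprio chars = pvEmit max_chars (pvLabel lines inprio) chars := by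
  induction lines generalizing inprio chars with
  | nil => rfl
  | cons line rest ih =>
    simp only [pvALoop, pvLabel]
    by_cases hf : pvForced line
    · simp [pvEmit, hf, ih]
    · by_cases hp : pvNextPrio line inprio = true
      · simp [pvEmit, hf, hp, ih]
      · simp [hf, hp, ih]

-- ===== VERDICT (by name: the statement is the Claim_ definition above) =====
theorem truncate_for_context_spec : Claim_equal_truncate_for_context := by
  intro content max_chars _
  unfold Spec_truncate_for_context truncate_for_context truncate_for_context_alt
  split_ifs with h
  · rfl
  · rw [pvALoop_eq_emit_label]
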